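-- pv_equiv track=rewrite | github.com/Kris465/MemoryBox | Workshop7_homework/exception.py | fourth_check
-- ===== SOURCE A (Python) =====
-- def fourth_check(use_string):
--     indexes = [i + 2 for i in range(len(use_string)) if use_string[i] == "/"]
--     answer = use_string
--     for ind in indexes:
--         if use_string[ind] == "0":
--             answer = "division by zero"
--         else: answer = use_string
--
--     return answer
-- ===== SOURCE B (Python) =====
-- def fourth_check(use_string):
--     pos = use_string.rfind('/')
--     if pos == -1:
--         return use_string
--     return "division by zero" if use_string[pos + 2] == "0" else use_string
-- ===== Notes on version B (the rewrite author's own statement) =====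
-- stated objective: faster
-- what changed: Instead of building the full list of all slash positions and looping over them (only the last iteration's answer survives), B finds the last slash directly with rfind and inspects the single character two places after it.
-- outside the precondition, e.g. on fourth_check('/'): A raises IndexError, B raises IndexError
import Mathlib
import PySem

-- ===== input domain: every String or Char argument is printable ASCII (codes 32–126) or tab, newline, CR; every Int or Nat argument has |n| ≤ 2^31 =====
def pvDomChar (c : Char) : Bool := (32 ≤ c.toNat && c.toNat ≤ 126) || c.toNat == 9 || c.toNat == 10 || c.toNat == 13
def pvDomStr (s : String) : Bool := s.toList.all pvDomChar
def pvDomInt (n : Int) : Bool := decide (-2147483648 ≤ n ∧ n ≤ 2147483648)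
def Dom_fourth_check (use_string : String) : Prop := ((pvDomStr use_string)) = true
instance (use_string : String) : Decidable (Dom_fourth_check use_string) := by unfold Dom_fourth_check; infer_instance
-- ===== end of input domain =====

-- B replaces A's loop over all slash positions (whose answer only the last iteration decides)
-- by a direct rfind of the last slash; return value agrees wherever A returns (Pre_ excludes A's IndexError inputs).

-- ===== PORT A =====
def fourth_check (use_string : String) : String :=
  let cs := use_string.toList
  let indexes : List Int :=
    ((PySem.List.pyRange 0 (cs.length) 1).filter
      (fun i => PySem.List.pyGet? cs i == some '/')).map (fun i => i + 2)
  indexes.foldl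
    (fun _answer ind =>
      if PySem.List.pyGet? cs ind == some '0' then "division by zero" else use_string)
    use_string

-- ===== PORT B =====
-- rfind('/') ported by hand: first '/' in the reversed character list; exact since rfind is a right-to-left scan.
def fourth_check_alt (use_string : String) : String :=
  let cs := use_string.toList
  match cs.reverse.findIdx? (fun c => c == '/') with
  | none => use_string
  | some j =>
      let pos : Int := (cs.length : Int) - 1 - (j : Int)
      if PySem.List.pyGet? cs (pos + 2) == some '0' then "division by zero" else use_string

-- ===== PRECONDITION & SPEC =====
-- Pre_ excludes exactly the inputs where the Python A raises IndexError (a '/' within the last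
-- two characters, so some slash index i has i+2 out of range); B raises there too.
def Pre_fourth_check (use_string : String) : Prop :=
  '/' ∉ use_string.toList.drop (use_string.toList.length - 2)
instance (use_string : String) : Decidable (Pre_fourth_check use_string) := by
  unfold Pre_fourth_check; infer_instance
def pvWitness_fourth_check : String := "1/x0"

def Spec_fourth_check (use_string : String) (out : String) : Prop := out = fourth_check_alt use_string
instance (use_string : String) (out : String) : Decidable (Spec_fourth_check use_string out) := by unfold Spec_fourth_check; infer_instance

-- ===== CLAIM (what is proved, stated in full; the proofs are below) =====
def Claim_equal_fourth_check : Prop := ∀ (use_string : String), Dom_fourth_check use_string → Pre_fourth_check use_string → Spec_fourth_check use_string (fourth_check use_string)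

-- ===== LEMMAS AND PROOFS =====

-- A's loop ignores the accumulator: only the last index decides the answer.
theorem foldl_const_fun (g : Int → String) :
    ∀ (l : List Int) (init : String),
      l.foldl (fun _ i => g i) init = (match l.getLast? with | none => init | some i => g i) := by
  intro l
  induction l with
  | nil => intro init; rfl
  | cons a t ih =>
      intro init
      cases t with
      | nil => rfl
      | cons b u =>
          rw [List.foldl_cons, ih (g a), List.getLast?_cons_cons]
          cases hg : (b :: u).getLast? with
          | none => exact absurd hg (by simp)
          | some x => rfl

-- last index of the filtered range ↔ first match in the reversed list
theorem key_lastFilter_findIdxRev (p : Nat → Bool) :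
    ∀ (r : List Char) (q : Char → Bool),
      (∀ i (hi : i < r.length), p (r.length - 1 - i) = q r[i]) →
      ((List.range r.length).filter p).getLast? =
        (r.findIdx? q).map (fun j => r.length - 1 - j)
  | [], q, _ => by simp
  | a :: t, q, h => by
      have h0 : p t.length = q a := by
        have := h 0 (by simp)
        simpa using this
      rw [show (a :: t).length = t.length + 1 from rfl, List.range_succ, List.filter_append,
        List.findIdx?_cons]
      by_cases hqa : q a = true
      · rw [hqa]
        have hp : p t.length = true := h0.trans hqa
        simp [hp]
      · rw [Bool.not_eq_true] at hqa
        have hpf : p t.length = false := by rw [h0, hqa]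
        rw [hqa]
        simp only [List.filter_cons, hpf, Bool.false_eq_true, if_false, List.filter_nil,
          List.append_nil]
        have ih := key_lastFilter_findIdxRev p t q (by
          intro i hi
          have h2 := h (i + 1) (by simpa using Nat.succ_lt_succ hi)
          have he : (a :: t).length - 1 - (i + 1) = t.length - 1 - i := by
            simp; omega
          rw [he] at h2
          simpa using h2)
        rw [ih, Option.map_map]
        cases hfi : t.findIdx? q with
        | none => simp
        | some j =>
            simp only [Option.map_some, Function.comp_apply]
            congr 1
            omega

-- the equality of the two ports, stated over the underlying character list
theorem main_list (s : String) (cs : List Char) :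
    (((PySem.List.pyRange 0 (cs.length) 1).filter
        (fun i => PySem.List.pyGet? cs i == some '/')).map (fun i => i + 2)).foldl
      (fun _answer ind =>
        if PySem.List.pyGet? cs ind == some '0' then "division by zero" else s) s
    = match cs.reverse.findIdx? (fun c => c == '/') with
      | none => s
      | some j =>
          if PySem.List.pyGet? cs (((cs.length : Int) - 1 - (j : Int)) + 2) == some '0'
          then "division by zero" else s := by
  have hrange : PySem.List.pyRange 0 ((cs.length : Int)) 1
      = (List.range cs.length).map (fun k => ((k : Nat) : Int)) := by
    rw [PySem.List.pyRange_one]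
    simp only [sub_zero, Int.toNat_natCast, zero_add]
  rw [hrange, List.filter_map, List.map_map, foldl_const_fun]
  have hkey := key_lastFilter_findIdxRev
      (fun k => PySem.List.pyGet? cs ((k : Nat) : Int) == some '/')
      cs.reverse (fun c => c == '/')
      (by
        intro i hi
        have hi' : i < cs.length := by simpa using hi
        simp only [List.length_reverse, List.getElem_reverse]
        rw [PySem.List.pyGet?_natCast, List.getElem?_eq_getElem (by omega)]
        simp)
  simp only [List.length_reverse] at hkey
  have hcomp : List.filter ((fun i => PySem.List.pyGet? cs i == some '/') ∘ fun k => ((k : Nat) : Int))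
        (List.range cs.length)
      = (List.range cs.length).filter (fun k => PySem.List.pyGet? cs ((k : Nat) : Int) == some '/') := rfl
  rw [hcomp, List.getLast?_map, hkey]
  cases hfi : cs.reverse.findIdx? (fun c => c == '/') with
  | none => simp
  | some j =>
      have hj : j < cs.length := by
        have := List.findIdx?_eq_some_iff_findIdx_eq.mp hfi
        simpa using this.1
      simp only [Option.map_some, Function.comp_apply]
      have hcast : (((cs.length - 1 - j : Nat) : Int)) + 2
          = ((cs.length : Int) - 1 - (j : Int)) + 2 := by omega
      rw [hcast]

-- ===== VERDICT (by name: the statement is the Claim_ definition above) =====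
theorem fourth_check_spec : Claim_equal_fourth_check := by
  intro s _ _
  unfold Spec_fourth_check fourth_check fourth_check_alt
  exact main_list s s.toList
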